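-- pv_equiv track=rewrite | github.com/dummydoo/livermore | app/utils.py | give_base_quote
-- ===== SOURCE A (Python) =====
-- def give_base_quote(market):
--     """in a pair; decide which is the base and which is the quote"""
--     m = market.upper()
--     quote_currencies = [
--         "BTC",
--         "ETH",
--         "USDT",
--         "BNB",
--         "EOS",
--         "XRP",
--         "USD",
--         "GBP",
--         "EUR",
--         "CHF",
--         "GHS",
--         "NEO",
--     ]
--
--     base = ""
--     quote = ""
--
--     for c in quote_currencies:
--         l = len(c)
--         if m[-l:] == c:
--             quote = c
--             base = m[:-l]
--     return base, quote
-- ===== SOURCE B (Python) =====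
-- def give_base_quote(market):
--     """in a pair; decide which is the base and which is the quote"""
--     m = market.upper()
--     quotes_by_len = [
--         (4, {"USDT"}),
--         (3, {"BTC", "ETH", "BNB", "EOS", "XRP", "USD", "GBP", "EUR", "CHF", "GHS", "NEO"}),
--     ]
--     for l, qs in quotes_by_len:
--         suffix = m[-l:]
--         if suffix in qs:
--             return m[:-l], suffix
--     return "", ""
-- ===== Notes on version B (the rewrite author's own statement) =====
-- stated objective: idiomatic
-- what changed: B replaces A's last-match-wins fold over all 12 currencies with a first-match loop over the two distinct suffix lengths, each with a set of currencies of that length, returning early on a hit (no listed currency is a suffix of another, so at most one match exists).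
import Mathlib
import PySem

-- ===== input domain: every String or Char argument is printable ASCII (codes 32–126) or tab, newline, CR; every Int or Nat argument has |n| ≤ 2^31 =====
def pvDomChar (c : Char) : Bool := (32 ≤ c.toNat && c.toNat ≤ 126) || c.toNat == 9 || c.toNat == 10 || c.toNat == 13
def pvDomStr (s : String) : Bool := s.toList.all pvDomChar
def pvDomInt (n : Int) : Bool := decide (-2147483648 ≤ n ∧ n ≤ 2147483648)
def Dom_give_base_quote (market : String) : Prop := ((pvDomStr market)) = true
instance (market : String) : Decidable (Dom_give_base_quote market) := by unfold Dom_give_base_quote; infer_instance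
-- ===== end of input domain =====

-- B iterates over the two distinct suffix lengths with a set of quote currencies per
-- length and returns on the first hit, instead of A's last-match fold over all 12
-- currencies; objective: idiomatic.


-- ===== PORT A =====
def give_base_quote (market : String) : String × String :=
  let m := PySem.Str.upper market
  let quote_currencies : List String :=
    ["BTC", "ETH", "USDT", "BNB", "EOS", "XRP", "USD", "GBP", "EUR", "CHF", "GHS", "NEO"]
  quote_currencies.foldl
    (fun st c =>
      let l : Int := (PySem.Str.len c : Int)
      if PySem.Str.slice m (some (-l)) none == c then (PySem.Str.slice m none (some (-l)), c)
      else st)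
    ("", "")

-- ===== PORT B =====
def pvAltLoop (m : String) : List (Int × PySem.Set String) → String × String
  | [] => ("", "")
  | (l, qs) :: rest =>
      let suffix := PySem.Str.slice m (some (-l)) none
      if PySem.Set.contains qs suffix then (PySem.Str.slice m none (some (-l)), suffix)
      else pvAltLoop m rest

def give_base_quote_alt (market : String) : String × String :=
  let m := PySem.Str.upper market
  let quotes_by_len : List (Int × PySem.Set String) :=
    [(4, PySem.Set.ofList ["USDT"]),
     (3, PySem.Set.ofList ["BTC", "ETH", "BNB", "EOS", "XRP", "USD", "GBP", "EUR", "CHF", "GHS", "NEO"])]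
  pvAltLoop m quotes_by_len

-- ===== PRECONDITION & SPEC =====
def Spec_give_base_quote (market : String) (out : String × String) : Prop := out = give_base_quote_alt market
instance (market : String) (out : String × String) : Decidable (Spec_give_base_quote market out) := by unfold Spec_give_base_quote; infer_instance

-- ===== CLAIM (what is proved, stated in full; the proofs are below) =====
def Claim_equal_give_base_quote : Prop := ∀ (market : String), Dom_give_base_quote market → Spec_give_base_quote market (give_base_quote market)

-- ===== LEMMAS AND PROOFS =====

-- if the last 4 characters are "USDT", the last 3 characters are "SDT"
lemma pv_suffix3_of_suffix4 (cs : List Char)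
    (h : PySem.List.slice cs (some (-4)) none = "USDT".toList) :
    PySem.List.slice cs (some (-3)) none = "SDT".toList := by
  rw [PySem.List.slice_some_none] at h ⊢
  have hc4 : PySem.List.clampIdx cs.length (-4) = cs.length - 4 := by simp [pysem]
  have hc3 : PySem.List.clampIdx cs.length (-3) = cs.length - 3 := by simp [pysem]
  rw [hc4] at h
  rw [hc3]
  have h4 : 4 ≤ cs.length := by
    by_contra hn
    have h0 : cs.length - 4 = 0 := by omega
    rw [h0, List.drop_zero] at h
    have := congrArg List.length h
    simp at this
    omega
  have hsplit : cs.length - 3 = (cs.length - 4) + 1 := by omega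
  rw [hsplit, ← List.drop_drop, h]
  decide

lemma pv_suffix3_of_suffix4' (m : String)
    (h : PySem.Str.slice m (some (-4)) none = "USDT") :
    PySem.Str.slice m (some (-3)) none = "SDT" := by
  have hl : (PySem.Str.slice m (some (-4)) none).toList = "USDT".toList := by rw [h]
  simp only [PySem.Str.toList_slice, PySem.Chars.slice_eq_listSlice] at hl
  have h3 := pv_suffix3_of_suffix4 m.toList hl
  apply String.toList_injective
  simpa only [PySem.Str.toList_slice, PySem.Chars.slice_eq_listSlice] using h3

-- the two loop bodies agree for an arbitrary (already upper-cased) string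
set_option maxHeartbeats 1000000 in
lemma pv_core (m : String) :
    (["BTC", "ETH", "USDT", "BNB", "EOS", "XRP", "USD", "GBP", "EUR", "CHF", "GHS", "NEO"]).foldl
      (fun (st : String × String) c =>
        let l : Int := (PySem.Str.len c : Int)
        if PySem.Str.slice m (some (-l)) none == c then (PySem.Str.slice m none (some (-l)), c) else st)
      ("", "")
    = pvAltLoop m [(4, PySem.Set.ofList ["USDT"]),
        (3, PySem.Set.ofList ["BTC", "ETH", "BNB", "EOS", "XRP", "USD", "GBP", "EUR", "CHF", "GHS", "NEO"])] := by
  simp only [List.foldl, pvAltLoop]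
  simp only [show ((PySem.Str.len "BTC" : Int)) = 3 from by decide,
    show ((PySem.Str.len "ETH" : Int)) = 3 from by decide,
    show ((PySem.Str.len "USDT" : Int)) = 4 from by decide,
    show ((PySem.Str.len "BNB" : Int)) = 3 from by decide,
    show ((PySem.Str.len "EOS" : Int)) = 3 from by decide,
    show ((PySem.Str.len "XRP" : Int)) = 3 from by decide,
    show ((PySem.Str.len "USD" : Int)) = 3 from by decide,
    show ((PySem.Str.len "GBP" : Int)) = 3 from by decide,
    show ((PySem.Str.len "EUR" : Int)) = 3 from by decide,
    show ((PySem.Str.len "CHF" : Int)) = 3 from by decide,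
    show ((PySem.Str.len "GHS" : Int)) = 3 from by decide,
    show ((PySem.Str.len "NEO" : Int)) = 3 from by decide,
    show PySem.Set.ofList ["USDT"] = ["USDT"] from by decide,
    show PySem.Set.ofList ["BTC", "ETH", "BNB", "EOS", "XRP", "USD", "GBP", "EUR", "CHF", "GHS", "NEO"]
      = ["BTC", "ETH", "BNB", "EOS", "XRP", "USD", "GBP", "EUR", "CHF", "GHS", "NEO"] from by decide]
  simp only [PySem.Set.contains, List.contains_eq_mem, List.mem_cons, List.not_mem_nil, or_false,
    beq_iff_eq, decide_eq_true_eq]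
  by_cases h4 : PySem.Str.slice m (some (-4)) none = "USDT"
  · have h3 := pv_suffix3_of_suffix4' m h4
    simp [h4, h3]
  · simp only [h4, if_false]
    by_cases hD : PySem.Str.slice m (some (-3)) none
        ∈ (["BTC", "ETH", "BNB", "EOS", "XRP", "USD", "GBP", "EUR", "CHF", "GHS", "NEO"] : List String)
    · simp only [List.mem_cons, List.not_mem_nil, or_false] at hD
      rcases hD with h|h|h|h|h|h|h|h|h|h|h <;> simp [h]
    · simp only [List.mem_cons, List.not_mem_nil, or_false] at hD
      push Not at hD
      obtain ⟨n1,n2,n3,n4,n5,n6,n7,n8,n9,n10,n11⟩ := hD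
      simp [n1,n2,n3,n4,n5,n6,n7,n8,n9,n10,n11]

-- ===== VERDICT (by name: the statement is the Claim_ definition above) =====
theorem give_base_quote_spec : Claim_equal_give_base_quote := by
  intro market _
  unfold Spec_give_base_quote give_base_quote give_base_quote_alt
  exact pv_core (PySem.Str.upper market)
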